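-- pv_equiv track=rewrite | github.com/ccc96360/Algorithm | BOJ/Gold I/BOJ11505.py | makeSegmentTree
-- ===== SOURCE A (Python) =====
-- OPERAND = 1000000007
--
-- def makeSegmentTree(node, start, end, tree, li):
--     if start == end:
--         tree[node] = li[start]
--         return tree[node]
--     mid = (start + end) // 2
--     left = makeSegmentTree(node * 2, start, mid, tree, li)
--     right = makeSegmentTree(node * 2 + 1, mid + 1, end, tree, li)
--     tree[node] = (left * right) % OPERAND
--     return tree[node]
-- ===== SOURCE B (Python) =====
-- OPERAND = 1000000007
--
-- def makeSegmentTree(node, start, end, tree, li):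
--     stack = [(node, start, end, False)]
--     while stack:
--         n, s, e, ready = stack.pop()
--         if s >= e:
--             tree[n] = li[s]
--         elif ready:
--             tree[n] = (tree[n * 2] * tree[n * 2 + 1]) % OPERAND
--         else:
--             m = (s + e) // 2
--             stack.append((n, s, e, True))
--             stack.append((n * 2 + 1, m + 1, e, False))
--             stack.append((n * 2, s, m, False))
--     return tree[node]
-- ===== Notes on version B (the rewrite author's own statement) =====
-- stated objective: alternative
-- what changed: The recursive tree build is replaced by an iterative explicit-stack post-order traversal: frames (node, start, end, ready) are pushed and popped, an internal node is re-pushed as 'ready' and computes tree[node] from its already-written children slots, so the same tree slots get the same values and the same root value is returned without recursion.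
-- outside the precondition, e.g. on makeSegmentTree(-1, 0, 0, [7], [9]): A returns 9, B returns 9; on makeSegmentTree(1, 0, 2, [0, 0, 0, 0, 0, 0], [2, 3, 4]): A returns 24, B returns 24
import Mathlib
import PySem

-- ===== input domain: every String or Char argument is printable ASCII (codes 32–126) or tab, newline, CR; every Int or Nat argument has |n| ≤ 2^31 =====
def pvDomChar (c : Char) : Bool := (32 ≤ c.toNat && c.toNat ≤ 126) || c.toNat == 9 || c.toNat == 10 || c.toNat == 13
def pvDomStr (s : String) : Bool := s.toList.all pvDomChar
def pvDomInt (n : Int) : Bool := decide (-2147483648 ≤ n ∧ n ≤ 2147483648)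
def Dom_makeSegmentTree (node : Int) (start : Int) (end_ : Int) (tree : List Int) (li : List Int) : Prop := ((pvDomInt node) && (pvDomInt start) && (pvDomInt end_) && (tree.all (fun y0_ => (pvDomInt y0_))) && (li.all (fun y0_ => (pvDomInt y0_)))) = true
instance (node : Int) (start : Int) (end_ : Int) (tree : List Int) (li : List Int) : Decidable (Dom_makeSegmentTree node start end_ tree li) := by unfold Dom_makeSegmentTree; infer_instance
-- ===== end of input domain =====

-- B replaces A's recursion by an iterative explicit-stack post-order traversal (same writes to `tree`,
-- same return value; equivalence is proved for the RETURN value — both Pythons mutate `tree` identically).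

def OPERAND : Int := 1000000007

-- ===== PORT A =====
-- A, with a fuel parameter that only makes the recursion total (wrapper passes enough fuel for the
-- whole recursion, so fuel never runs out on admitted inputs); returns (return value, updated tree).
def mstA : Nat → Int → Int → Int → List Int → List Int → Int × List Int
  | 0, _, _, _, tree, _ => (0, tree)
  | fuel+1, node, start, end_, tree, li =>
    if start = end_ then
      let tree1 := PySem.List.pySetD tree node (PySem.List.pyGetD li start 0)  -- tree[node] = li[start]
      (PySem.List.pyGetD tree1 node 0, tree1)                                  -- return tree[node]
    else
      let mid := PySem.Int.floordiv (start + end_) 2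
      let l := mstA fuel (node * 2) start mid tree li
      let r := mstA fuel (node * 2 + 1) (mid + 1) end_ l.2 li
      let tree3 := PySem.List.pySetD r.2 node (PySem.Int.mod (l.1 * r.1) OPERAND)
      (PySem.List.pyGetD tree3 node 0, tree3)

def makeSegmentTree (node : Int) (start : Int) (end_ : Int) (tree : List Int) (li : List Int) : Int :=
  (mstA ((end_ - start).toNat + 1) node start end_ tree li).1

-- ===== PORT B =====
-- the while-stack loop of Source B; frames are (n, s, e, ready); fuel only bounds the number of
-- iterations (wrapper passes more than the loop ever executes on admitted inputs)
def mstB : Nat → List (Int × Int × Int × Bool) → List Int → List Int → List Int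
  | 0, _, tree, _ => tree
  | _+1, [], tree, _ => tree
  | fuel+1, (n, s, e, ready) :: rest, tree, li =>
    if e ≤ s then
      mstB fuel rest (PySem.List.pySetD tree n (PySem.List.pyGetD li s 0)) li
    else if ready then
      mstB fuel rest (PySem.List.pySetD tree n
        (PySem.Int.mod (PySem.List.pyGetD tree (n * 2) 0 * PySem.List.pyGetD tree (n * 2 + 1) 0) OPERAND)) li
    else
      let m := PySem.Int.floordiv (s + e) 2
      mstB fuel ((n * 2, s, m, false) :: (n * 2 + 1, m + 1, e, false) :: (n, s, e, true) :: rest) tree li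

def makeSegmentTree_alt (node : Int) (start : Int) (end_ : Int) (tree : List Int) (li : List Int) : Int :=
  let tree1 := mstB (4 * ((end_ - start).toNat + 1) + 4) [(node, start, end_, false)] tree li
  PySem.List.pyGetD tree1 node 0

-- ===== PRECONDITION & SPEC =====
-- Pre_ is the natural segment-tree domain: node ≥ 0 (for node < 0 the heap labels collide and wrap and
-- any agreement of the two programs is accidental), -len(li) ≤ start ≤ end_ < len(li) (every leaf read
-- of li is in range; start > end_ makes Python recurse forever), and a tree long enough for every
-- write — the bound (node+1)·2^⌈log₂ L⌉ ≤ len(tree) is slightly conservative: a tree that barely fits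
-- is excluded although A returns on it (see cites); shorter trees make Python raise IndexError.
-- (On start > end_, excluded here, Python A raises RecursionError while B's loop treats the frame as
-- a leaf and returns li[start]; nothing is claimed there.)
def Pre_makeSegmentTree (node : Int) (start : Int) (end_ : Int) (tree : List Int) (li : List Int) : Prop :=
  0 ≤ node ∧ -(li.length : Int) ≤ start ∧ start ≤ end_ ∧ end_ < li.length ∧
  (node.toNat + 1) * 2 ^ Nat.clog 2 ((end_ - start).toNat + 1) ≤ tree.length

instance (node : Int) (start : Int) (end_ : Int) (tree : List Int) (li : List Int) : Decidable (Pre_makeSegmentTree node start end_ tree li) := by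
  unfold Pre_makeSegmentTree; infer_instance

def pvWitness_makeSegmentTree : Int × Int × Int × List Int × List Int := (1, 0, 1, [0, 0, 0, 0], [5, 6])

def Spec_makeSegmentTree (node : Int) (start : Int) (end_ : Int) (tree : List Int) (li : List Int) (out : Int) : Prop := out = makeSegmentTree_alt node start end_ tree li
instance (node : Int) (start : Int) (end_ : Int) (tree : List Int) (li : List Int) (out : Int) : Decidable (Spec_makeSegmentTree node start end_ tree li out) := by unfold Spec_makeSegmentTree; infer_instance

-- ===== CLAIM (what is proved, stated in full; the proofs are below) =====
def Claim_equal_makeSegmentTree : Prop := ∀ (node : Int) (start : Int) (end_ : Int) (tree : List Int) (li : List Int), Dom_makeSegmentTree node start end_ tree li → Pre_makeSegmentTree node start end_ tree li → Spec_makeSegmentTree node start end_ tree li (makeSegmentTree node start end_ tree li)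

-- ===== LEMMAS AND PROOFS =====

-- number of loop iterations B spends on one unprocessed frame spanning L ≥ 1 elements
def costN (L : Nat) : Nat :=
  if L ≤ 1 then 1 else 2 + costN ((L + 1) / 2) + costN (L / 2)
termination_by L
decreasing_by all_goals omega

theorem costN_le (L : Nat) (hL : 1 ≤ L) : costN L ≤ 4 * L - 3 := by
  induction L using Nat.strong_induction_on with
  | _ L ih =>
    rw [costN]
    by_cases h : L ≤ 1
    · simp [h]; omega
    · have h1 := ih ((L + 1) / 2) (by omega) (by omega)
      have h2 := ih (L / 2) (by omega) (by omega)
      simp only [h, if_false]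
      omega

-- definitional step lemmas (one loop iteration / one recursive call)
theorem mstB_step (f : Nat) (n s e : Int) (ready : Bool) (rest : List (Int × Int × Int × Bool)) (tree li : List Int) :
    mstB (f + 1) ((n, s, e, ready) :: rest) tree li =
      if e ≤ s then
        mstB f rest (PySem.List.pySetD tree n (PySem.List.pyGetD li s 0)) li
      else if ready then
        mstB f rest (PySem.List.pySetD tree n
          (PySem.Int.mod (PySem.List.pyGetD tree (n * 2) 0 * PySem.List.pyGetD tree (n * 2 + 1) 0) OPERAND)) li
      else
        let m := PySem.Int.floordiv (s + e) 2
        mstB f ((n * 2, s, m, false) :: (n * 2 + 1, m + 1, e, false) :: (n, s, e, true) :: rest) tree li := rfl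

theorem mstA_step (f : Nat) (n s e : Int) (tree li : List Int) :
    mstA (f + 1) n s e tree li =
      if s = e then
        let tree1 := PySem.List.pySetD tree n (PySem.List.pyGetD li s 0)
        (PySem.List.pyGetD tree1 n 0, tree1)
      else
        let mid := PySem.Int.floordiv (s + e) 2
        let l := mstA f (n * 2) s mid tree li
        let r := mstA f (n * 2 + 1) (mid + 1) e l.2 li
        let tree3 := PySem.List.pySetD r.2 n (PySem.Int.mod (l.1 * r.1) OPERAND)
        (PySem.List.pyGetD tree3 n 0, tree3) := rfl

theorem costN_one : costN 1 = 1 := by rw [costN]; simp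

-- A's return value is the tree slot it just wrote
theorem fstA (f : Nat) (n s e : Int) (tree li : List Int) (hf : 1 ≤ f) :
    (mstA f n s e tree li).1 = PySem.List.pyGetD (mstA f n s e tree li).2 n 0 := by
  cases f with
  | zero => omega
  | succ f => simp only [mstA]; split <;> rfl

-- mstA never changes the length of the tree
theorem lengthA (f : Nat) : ∀ (n s e : Int) (tree li : List Int),
    (mstA f n s e tree li).2.length = tree.length := by
  induction f with
  | zero => intro n s e tree li; rfl
  | succ f ih =>
    intro n s e tree li
    simp only [mstA]
    split
    · simp [PySem.List.length_pySetD]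
    · simp [PySem.List.length_pySetD, ih]

-- mstA only writes slots ≥ n (for n ≥ 1): every lower slot keeps its value
theorem lowerA (f : Nat) : ∀ (n s e : Int) (tree li : List Int) (j : Nat),
    0 ≤ n → (j : Int) < n →
    PySem.List.pyGetD (mstA f n s e tree li).2 (j : Int) 0 = PySem.List.pyGetD tree (j : Int) 0 := by
  induction f with
  | zero => intro n s e tree li j _ _; rfl
  | succ f ih =>
    intro n s e tree li j hn hj
    have hset : ∀ (t : List Int) (v : Int),
        PySem.List.pyGetD (PySem.List.pySetD t n v) (j : Int) 0 = PySem.List.pyGetD t (j : Int) 0 := by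
      intro t v
      rw [PySem.List.pySetD_of_nonneg t v (by omega)]
      simp only [PySem.List.pyGetD_natCast, List.getD]
      rw [List.getElem?_set_ne (by omega)]
    simp only [mstA]
    split
    · exact hset tree _
    · rw [hset, ih _ _ _ _ _ j (by omega) (by omega), ih _ _ _ _ _ j (by omega) (by omega)]

-- the simulation: B's loop, run on one unprocessed frame, consumes exactly costN frames of fuel and
-- leaves the tree exactly as A's recursion on the same frame does
theorem simB (k : Nat) : ∀ (n s e : Int) (tree li : List Int)
    (rest : List (Int × Int × Int × Bool)) (fA fB : Nat),
    (e - s).toNat = k → 0 ≤ n → s ≤ e → k + 1 ≤ fA →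
    (n.toNat + 1) * 2 ^ Nat.clog 2 (k + 1) ≤ tree.length →
    mstB (costN (k + 1) + fB) ((n, s, e, false) :: rest) tree li
      = mstB fB rest (mstA fA n s e tree li).2 li := by
  induction k using Nat.strong_induction_on with
  | _ k ih =>
    intro n s e tree li rest fA fB hk hn hse hfA htree
    obtain ⟨fA', rfl⟩ : ∃ f, fA = f + 1 := ⟨fA - 1, by omega⟩
    by_cases heq : s = e
    · -- leaf frame
      have h0 : k = 0 := by omega
      subst h0
      have hc : costN (0 + 1) + fB = fB + 1 := by rw [show (0 + 1 : Nat) = 1 from rfl, costN_one]; omega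
      rw [hc, mstB_step, if_pos (le_of_eq heq.symm)]
      simp only [mstA_step, if_pos heq]
    · -- internal frame
      have hm : PySem.Int.floordiv (s + e) 2 = (s + e) / 2 :=
        PySem.Int.floordiv_eq_ediv_of_pos (by norm_num)
      set m := PySem.Int.floordiv (s + e) 2 with hmdef
      have hk1 : 1 ≤ k := by omega
      have hsm : s ≤ m := by omega
      have hme : m < e := by omega
      have hkl : (m - s).toNat = k / 2 := by omega
      have hkr : (e - (m + 1)).toNat = k - 1 - k / 2 := by omega
      set kl := k / 2 with hkldef
      set kr := k - 1 - k / 2 with hkrdef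
      have hcost : costN (k + 1) = 2 + costN (kl + 1) + costN (kr + 1) := by
        rw [costN]
        have h1 : ¬ (k + 1 ≤ 1) := by omega
        have h2 : (k + 1 + 1) / 2 = kl + 1 := by omega
        have h3 : (k + 1) / 2 = kr + 1 := by omega
        simp [h1, h2, h3]
      -- clog bookkeeping
      have hclog : Nat.clog 2 (k + 1) = Nat.clog 2 (kl + 1) + 1 := by
        have harg : (k + 1 + 2 - 1) / 2 = kl + 1 := by omega
        have h := Nat.clog_of_two_le (b := 2) (n := k + 1) (by norm_num) (by omega)
        rwa [harg] at h
      have hmono : Nat.clog 2 (kr + 1) ≤ Nat.clog 2 (kl + 1) :=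
        Nat.clog_mono_right 2 (by omega)
      have hpow : (2 * n.toNat + 2) * 2 ^ Nat.clog 2 (kl + 1) ≤ tree.length := by
        calc (2 * n.toNat + 2) * 2 ^ Nat.clog 2 (kl + 1)
            = (n.toNat + 1) * 2 ^ (Nat.clog 2 (kl + 1) + 1) := by ring
          _ = (n.toNat + 1) * 2 ^ Nat.clog 2 (k + 1) := by rw [hclog]
          _ ≤ tree.length := htree
      have hln : (n * 2).toNat = 2 * n.toNat := by omega
      have hrn : (n * 2 + 1).toNat = 2 * n.toNat + 1 := by omega
      have Hl : ((n * 2).toNat + 1) * 2 ^ Nat.clog 2 (kl + 1) ≤ tree.length := by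
        rw [hln]; exact le_trans (Nat.mul_le_mul_right _ (by omega)) hpow
      have Hr : ((n * 2 + 1).toNat + 1) * 2 ^ Nat.clog 2 (kr + 1) ≤ tree.length := by
        rw [hrn]
        exact le_trans (Nat.mul_le_mul_left _ (Nat.pow_le_pow_right (by norm_num) hmono)) hpow
      -- one loop step: pop the unprocessed frame, push left, right, ready
      have hfuel : costN (k + 1) + fB
          = (costN (kl + 1) + (costN (kr + 1) + (1 + fB))) + 1 := by rw [hcost]; omega
      rw [hfuel, mstB_step, if_neg (show ¬ e ≤ s by omega)]
      simp only [Bool.false_eq_true, if_false, ← hmdef]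
      -- left subtree
      set l := mstA fA' (n * 2) s m tree li with hldef
      rw [ih kl (by omega) (n * 2) s m tree li _ fA' _ hkl (by omega) hsm (by omega) Hl]
      -- right subtree
      set r := mstA fA' (n * 2 + 1) (m + 1) e l.2 li with hrdef
      have hlen : l.2.length = tree.length := lengthA fA' (n * 2) s m tree li
      rw [ih kr (by omega) (n * 2 + 1) (m + 1) e l.2 li _ fA' _ hkr (by omega) (by omega)
        (by omega) (by rw [hlen]; exact Hr)]
      -- ready frame: B's reads of the two child slots are A's two return values
      have hread_l : PySem.List.pyGetD r.2 (n * 2) 0 = l.1 := by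
        have h1 : PySem.List.pyGetD r.2 (n * 2) 0 = PySem.List.pyGetD l.2 (n * 2) 0 := by
          have := lowerA fA' (n * 2 + 1) (m + 1) e l.2 li (n * 2).toNat (by omega) (by omega)
          rwa [Int.toNat_of_nonneg (by omega)] at this
        rw [h1, ← fstA fA' (n * 2) s m tree li (by omega), hldef]
      have hread_r : PySem.List.pyGetD r.2 (n * 2 + 1) 0 = r.1 :=
        (fstA fA' (n * 2 + 1) (m + 1) e l.2 li (by omega)).symm
      rw [show (1 + fB : Nat) = fB + 1 from by omega, mstB_step, if_neg (show ¬ e ≤ s by omega)]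
      simp only [if_true]
      rw [hread_l, hread_r]
      -- A's step
      rw [mstA_step, if_neg heq]

theorem mstB_nil (f : Nat) (tree li : List Int) : mstB f [] tree li = tree := by
  cases f <;> rfl

-- ===== VERDICT (by name: the statement is the Claim_ definition above) =====
theorem makeSegmentTree_spec : Claim_equal_makeSegmentTree := by
  intro node start end_ tree li _ hpre
  obtain ⟨hn, hs, hse, hli, htree⟩ := hpre
  unfold Spec_makeSegmentTree makeSegmentTree makeSegmentTree_alt
  set k := (end_ - start).toNat with hk
  have hcost : costN (k + 1) ≤ 4 * (k + 1) := le_trans (costN_le (k + 1) (by omega)) (by omega)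
  have hF : 4 * (k + 1) + 4 = costN (k + 1) + (4 * (k + 1) + 4 - costN (k + 1)) := by omega
  rw [hF, simB k node start end_ tree li [] (k + 1) _ rfl hn hse (le_refl _) htree, mstB_nil]
  exact fstA (k + 1) node start end_ tree li (by omega)
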